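-- pv_equiv track=rewrite | github.com/krcooke/gchq | bin/gchq_puzzle.py | recursive_block
-- ===== SOURCE A (Python) =====
-- def recursive_block(input_blocks, input_white) :
--
--     white = int(input_white)
--     # Resultset
--     result_set = []
--
--     # sets the first item in the block list, sets it black and 1 white block
--     current_block = input_blocks[0]
--     remaining_blocks = input_blocks[1:]
--     new_block = [1 for i in range(0, current_block)]
--
--     # If the final block, then just pad out with 0 and return it
--     if len(input_blocks) == 1:
--         padding = [0 for i in range(0, white)]
--         return [new_block + padding]
--
--     # Decrement the the white space and add one to the block
--     white -= 1
--     new_block.append(0)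
--
--     # then loops from 0 to remaining white space - remaining blocks + 1
--     # e.g. 5 white - 2 blocks + 1
--     # e.g. 10 white - 3 blocks + 1
--     spare_white = white - len(remaining_blocks) + 1
--
--     # If we have no spare whites, then no need to loop adding extra white spaces
--     combined_results = []
--     if spare_white < 1 :
--         combinations = recursive_block(remaining_blocks, white)
--
--         for i in combinations :
--             joined_result = new_block + i
--             combined_results.append(joined_result)
--
--     else :
--         while spare_white >= 0:
--             # calls itself with the current row, remaining blocks and remaining white space
--             # If no blocks left, pad out with white
--             combinations = recursive_block(remaining_blocks, white)
--
--             for i in combinations :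
--                 joined_result = new_block + i
--                 combined_results.append(joined_result)
--             new_block.append(0)
--             white -= 1
--             spare_white -= 1
--
--     return combined_results
-- ===== SOURCE B (Python) =====
-- def recursive_block(input_blocks, input_white):
--     # Memoized recursion keyed on (blocks suffix, remaining white): each
--     # subproblem's combination list is built once and reused.
--     memo = {}
--
--     def solve(blocks, w):
--         key = (tuple(blocks), w)
--         if key in memo:
--             return memo[key]
--         ones = [1] * blocks[0]
--         rest = blocks[1:]
--         if not rest:
--             res = [ones + [0] * w]
--         else:
--             spare = w - len(blocks) + 1
--             res = []
--             for k in range(max(spare, 0) + 1):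
--                 pre = ones + [0] * (1 + k)
--                 for t in solve(rest, w - 1 - k):
--                     res.append(pre + t)
--         memo[key] = res
--         return res
--
--     return solve(list(input_blocks), int(input_white))
-- ===== Notes on version B (the rewrite author's own statement) =====
-- stated objective: alternative
-- what changed: Replaces A's mutating while-loop recursion (which rebuilds every suffix subproblem per caller) with a pure memoized recursion keyed on (blocks suffix, remaining white), a unified range loop over the gap width, and no mutated loop state.
-- outside the precondition, e.g. on recursive_block([], 3): A raises IndexError, B raises IndexError
import Mathlib
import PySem

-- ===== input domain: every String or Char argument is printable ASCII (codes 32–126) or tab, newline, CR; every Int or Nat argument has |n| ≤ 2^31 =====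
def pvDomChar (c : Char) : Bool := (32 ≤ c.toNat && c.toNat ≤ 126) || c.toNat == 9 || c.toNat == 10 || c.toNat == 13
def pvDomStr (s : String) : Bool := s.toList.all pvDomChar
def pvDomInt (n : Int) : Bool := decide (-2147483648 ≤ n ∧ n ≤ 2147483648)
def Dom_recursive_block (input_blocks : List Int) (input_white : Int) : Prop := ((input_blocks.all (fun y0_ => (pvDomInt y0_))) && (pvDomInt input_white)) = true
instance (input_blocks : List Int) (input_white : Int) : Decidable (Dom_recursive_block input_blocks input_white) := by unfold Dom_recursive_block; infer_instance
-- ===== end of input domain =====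

-- A = exponential recursion with a mutating while loop; B = memoized recursion keyed on (suffix, white): each subproblem built once (alternative structure, no speed claim).
-- Pre_ excludes only the empty block list, on which Python A (and B) raise IndexError.


-- ===== PORT A =====
mutual
-- literal port of A; on [] Python raises IndexError (excluded by Pre_), the port returns []
def recursive_block (input_blocks : List Int) (input_white : Int) : List (List Int) :=
  match input_blocks with
  | [] => []
  | current_block :: remaining_blocks =>
    let white := input_white
    let new_block := (PySem.List.pyRange 0 current_block 1).map (fun _ => (1 : Int))
    if remaining_blocks = [] then
      [new_block ++ (PySem.List.pyRange 0 white 1).map (fun _ => (0 : Int))]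
    else
      let white := white - 1
      let new_block := new_block ++ [0]
      let spare_white := white - (remaining_blocks.length : Int) + 1
      if spare_white < 1 then
        (recursive_block remaining_blocks white).foldl
          (fun acc i => acc ++ [new_block ++ i]) []
      else
        rbLoop remaining_blocks spare_white white new_block []
termination_by (input_blocks.length, 1, 0)
decreasing_by all_goals (simp_wf; simp [Prod.lex_iff])

-- the 'while spare_white >= 0' loop of A, with its mutated state as parameters
def rbLoop (remaining : List Int) (spare white : Int) (new_block : List Int)
    (combined : List (List Int)) : List (List Int) :=
  if 0 ≤ spare then
    rbLoop remaining (spare - 1) (white - 1) (new_block ++ [0])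
      ((recursive_block remaining white).foldl (fun acc i => acc ++ [new_block ++ i]) combined)
  else combined
termination_by (remaining.length + 1, 0, (spare + 1).toNat)
decreasing_by all_goals (simp_wf; simp [Prod.lex_iff]) <;> omega
end

-- ===== PORT B =====
-- literal port of Source B's solve: memo is threaded instead of captured; keys are (suffix, white)
def rbAltSolve (blocks : List Int) (w : Int)
    (memo : PySem.Dict (List Int × Int) (List (List Int))) :
    List (List Int) × PySem.Dict (List Int × Int) (List (List Int)) :=
  match blocks with
  | [] => ([], memo)   -- Python raises IndexError here; unreachable from a nonempty top-level list
  | b :: rest =>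
    match memo.get? (b :: rest, w) with
    | some v => (v, memo)
    | none =>
      let ones := List.replicate b.toNat (1 : Int)   -- [1] * blocks[0]
      if rest = [] then
        let res := [ones ++ List.replicate w.toNat (0 : Int)]
        (res, memo.insert (b :: rest, w) res)
      else
        let spare := w - ((b :: rest).length : Int) + 1
        let p := (PySem.List.pyRange 0 (max spare 0 + 1) 1).foldl
          (fun (p : List (List Int) × PySem.Dict (List Int × Int) (List (List Int))) k =>
            let q := rbAltSolve rest (w - 1 - k) p.2
            (p.1 ++ q.1.map (fun t => ones ++ List.replicate (1 + k).toNat (0 : Int) ++ t), q.2))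
          ([], memo)
        (p.1, p.2.insert (b :: rest, w) p.1)
termination_by blocks.length
decreasing_by simp

def recursive_block_alt (input_blocks : List Int) (input_white : Int) : List (List Int) :=
  (rbAltSolve input_blocks input_white PySem.Dict.empty).1

-- ===== PRECONDITION & SPEC =====
-- Pre_ excludes exactly the empty block list, on which Python A raises IndexError (input_blocks[0]).
def Pre_recursive_block (input_blocks : List Int) (input_white : Int) : Prop :=
  input_blocks ≠ []
instance (input_blocks : List Int) (input_white : Int) :
    Decidable (Pre_recursive_block input_blocks input_white) := by
  unfold Pre_recursive_block; infer_instance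
def pvWitness_recursive_block : List Int × Int := ([2, 1], 5)

def Spec_recursive_block (input_blocks : List Int) (input_white : Int) (out : List (List Int)) : Prop := out = recursive_block_alt input_blocks input_white
instance (input_blocks : List Int) (input_white : Int) (out : List (List Int)) : Decidable (Spec_recursive_block input_blocks input_white out) := by unfold Spec_recursive_block; infer_instance

-- ===== CLAIM (what is proved, stated in full; the proofs are below) =====
def Claim_equal_recursive_block : Prop := ∀ (input_blocks : List Int) (input_white : Int), Dom_recursive_block input_blocks input_white → Pre_recursive_block input_blocks input_white → Spec_recursive_block input_blocks input_white (recursive_block input_blocks input_white)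

-- ===== LEMMAS AND PROOFS =====

-- common pure form of both programs (proof device only)
def rbSpec : List Int → Int → List (List Int)
  | [], _ => []
  | b :: rest, w =>
    if rest = [] then
      [List.replicate b.toNat (1 : Int) ++ List.replicate w.toNat (0 : Int)]
    else
      let spare := w - ((b :: rest).length : Int) + 1
      (PySem.List.pyRange 0 (max spare 0 + 1) 1).flatMap
        (fun k => (rbSpec rest (w - 1 - k)).map
          (fun t => List.replicate b.toNat (1 : Int) ++ List.replicate (1 + k).toNat (0 : Int) ++ t))

lemma ones_eq (n : Int) (c : Int) :
    (PySem.List.pyRange 0 n 1).map (fun _ => c) = List.replicate n.toNat c := by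
  simp [PySem.List.pyRange_one, Function.comp_def]

-- the while loop of A, characterised as a flatMap over the iteration count
lemma rbLoop_eq (rem : List Int) (n : Nat) :
    ∀ (w : Int) (nb : List Int) (acc : List (List Int)),
      rbLoop rem (n : Int) w nb acc =
        acc ++ (List.range (n + 1)).flatMap
          (fun (k : Nat) => (recursive_block rem (w - (k : Int))).map
            (fun t => nb ++ List.replicate k (0 : Int) ++ t)) := by
  induction n with
  | zero =>
    intro w nb acc
    rw [rbLoop, if_pos (by omega : (0:Int) ≤ ((0:Nat) : Int)),
      rbLoop, if_neg (by omega : ¬ (0:Int) ≤ ((0:Nat) : Int) - 1)]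
    rw [PySem.List.foldl_append_singleton_eq_map]
    simp
  | succ n ih =>
    intro w nb acc
    rw [rbLoop, if_pos (by omega : (0:Int) ≤ ((n+1 : Nat) : Int))]
    have hc : ((n + 1 : Nat) : Int) - 1 = (n : Int) := by push_cast; ring
    rw [hc, PySem.List.foldl_append_singleton_eq_map, ih, List.append_assoc]
    congr 1
    conv_rhs => rw [show n + 1 + 1 = (n + 1) + 1 from rfl, List.range_succ_eq_map]
    rw [List.flatMap_cons, List.flatMap_map]
    congr 1
    · congr 1
      · funext t; simp
      · simp
    · congr 1
      funext k
      congr 1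
      · funext t; simp [List.replicate_succ]
      · congr 1
        push_cast
        ring

lemma recursive_block_eq_spec (bs : List Int) : ∀ (w : Int),
    recursive_block bs w = rbSpec bs w := by
  induction bs with
  | nil => intro w; rw [recursive_block, rbSpec]
  | cons b rest ih =>
    intro w
    simp only [recursive_block]
    by_cases hr : rest = []
    · subst hr
      simp [rbSpec]
    · rw [if_neg hr]
      rw [rbSpec.eq_def]
      simp only []
      rw [if_neg hr]
      by_cases hs : w - 1 - (rest.length : Int) + 1 < 1
      · rw [if_pos hs]
        have hmax : max (w - ((b :: rest).length : Int) + 1) 0 = 0 := by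
          simp only [List.length_cons]; push_cast; omega
        rw [hmax, PySem.List.foldl_append_singleton_eq_map, ih,
          PySem.List.pyRange_one_singleton]
        simp [List.append_assoc]
      · rw [if_neg hs]
        have h1 : 1 ≤ (w - 1 - (rest.length : Int) + 1).toNat := by omega
        obtain ⟨m, hm⟩ : ∃ m, (w - 1 - (rest.length : Int) + 1).toNat = m + 1 :=
          ⟨(w - 1 - (rest.length : Int) + 1).toNat - 1, by omega⟩
        have h0 : w - 1 - (rest.length : Int) + 1 = ((m + 1 : Nat) : Int) := by
          push_cast; omega
        rw [h0, rbLoop_eq]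
        have hmax : max (w - ((b :: rest).length : Int) + 1) 0 + 1 = ((m + 2 : Nat) : Int) := by
          simp only [List.length_cons]; push_cast; omega
        rw [hmax, PySem.List.pyRange_one 0 ((m + 2 : Nat) : Int)]
        have h2 : (((m + 2 : Nat) : Int) - 0).toNat = m + 2 := by push_cast; omega
        rw [h2]
        simp only [List.flatMap_map, List.nil_append, zero_add]
        congr 1
        funext k
        rw [ih]
        have h4 : (1 + (k : Int)).toNat = k + 1 := by omega
        rw [h4]
        congr 1
        funext t
        rw [ones_eq]
        simp [List.replicate_succ, List.append_assoc]

def rbInv (memo : PySem.Dict (List Int × Int) (List (List Int))) : Prop :=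
  ∀ key v, memo.get? key = some v → v = rbSpec key.1 key.2

-- the inner loop of B, characterised as a flatMap, with the memo invariant threaded through
lemma rbAlt_foldl (rest : List Int) (ones : List Int) (w : Int)
    (Hrest : ∀ (w : Int) (m : PySem.Dict (List Int × Int) (List (List Int))), rbInv m →
      (rbAltSolve rest w m).1 = rbSpec rest w ∧ rbInv (rbAltSolve rest w m).2)
    (ks : List Int) :
    ∀ (acc : List (List Int)) (memo : PySem.Dict (List Int × Int) (List (List Int))),
      rbInv memo →
      (ks.foldl (fun (p : List (List Int) × PySem.Dict (List Int × Int) (List (List Int))) k =>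
          (p.1 ++ (rbAltSolve rest (w - 1 - k) p.2).1.map
              (fun t => ones ++ List.replicate (1 + k).toNat (0 : Int) ++ t),
            (rbAltSolve rest (w - 1 - k) p.2).2))
        (acc, memo)).1
        = acc ++ ks.flatMap (fun k => (rbSpec rest (w - 1 - k)).map
            (fun t => ones ++ List.replicate (1 + k).toNat (0 : Int) ++ t))
      ∧ rbInv (ks.foldl (fun (p : List (List Int) × PySem.Dict (List Int × Int) (List (List Int))) k =>
          (p.1 ++ (rbAltSolve rest (w - 1 - k) p.2).1.map
              (fun t => ones ++ List.replicate (1 + k).toNat (0 : Int) ++ t),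
            (rbAltSolve rest (w - 1 - k) p.2).2))
        (acc, memo)).2 := by
  induction ks with
  | nil => intro acc memo h; exact ⟨by simp, h⟩
  | cons k ks ihk =>
    intro acc memo h
    obtain ⟨hv, hinv⟩ := Hrest (w - 1 - k) memo h
    simp only [List.foldl_cons]
    obtain ⟨h1, h2⟩ := ihk (acc ++ (rbAltSolve rest (w - 1 - k) memo).1.map
      (fun t => ones ++ List.replicate (1 + k).toNat (0 : Int) ++ t))
      (rbAltSolve rest (w - 1 - k) memo).2 hinv
    refine ⟨?_, h2⟩
    rw [h1, hv]
    simp [List.append_assoc]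

lemma rbAltSolve_eq_spec (bs : List Int) : ∀ (w : Int)
    (memo : PySem.Dict (List Int × Int) (List (List Int))), rbInv memo →
    (rbAltSolve bs w memo).1 = rbSpec bs w ∧ rbInv (rbAltSolve bs w memo).2 := by
  induction bs with
  | nil => intro w memo h; rw [rbAltSolve]; exact ⟨rfl, h⟩
  | cons b rest ih =>
    intro w memo h
    simp only [rbAltSolve]
    cases hget : memo.get? (b :: rest, w) with
    | some v =>
      exact ⟨h (b :: rest, w) v hget, h⟩
    | none =>
      by_cases hr : rest = []
      · rw [if_pos hr]
        subst hr
        constructor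
        · simp [rbSpec]
        · intro key v hv
          rw [PySem.Dict.get?_insert] at hv
          split at hv
          · rename_i hk
            subst hk
            injection hv with hv'
            subst hv'
            simp [rbSpec]
          · exact h key v hv
      · rw [if_neg hr]
        obtain ⟨h1, h2⟩ := rbAlt_foldl rest (List.replicate b.toNat (1 : Int)) w
          (fun w m hm => ih w m hm)
          (PySem.List.pyRange 0 (max (w - ((b :: rest).length : Int) + 1) 0 + 1) 1) [] memo h
        constructor
        · rw [h1, rbSpec.eq_def]
          simp only []
          rw [if_neg hr]
          simp
        · intro key v hv
          rw [PySem.Dict.get?_insert] at hv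
          split at hv
          · rename_i hk
            subst hk
            injection hv with hv'
            subst hv'
            rw [h1, rbSpec.eq_def]
            simp only []
            rw [if_neg hr]
            simp
          · exact h2 key v hv

-- ===== VERDICT (by name: the statement is the Claim_ definition above) =====
theorem recursive_block_spec : Claim_equal_recursive_block := by
  intro bs w _ _
  unfold Spec_recursive_block recursive_block_alt
  rw [recursive_block_eq_spec,
    (rbAltSolve_eq_spec bs w PySem.Dict.empty (by intro k v h; simp [PySem.Dict.get?_empty] at h)).1]
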